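-- pv_equiv track=rewrite | github.com/langchain-ai/langchain | libs/langchain_v1/langchain/agents/middleware/ace/playbook.py | _normalize_section_name
-- ===== SOURCE A (Python) =====
-- def _normalize_section_name(section: str) -> str:
--     r"""Normalize a section name for consistent matching.
--
--     Since we now use canonical snake_case section names everywhere,
--     this function is primarily for backwards compatibility with:
--     - Legacy playbooks using human-readable headers
--     - LLM outputs that may use variations
--
--     Args:
--         section: Raw section name from curator output or playbook header.
--
--     Returns:
--         Normalized section name for matching.
--
--     Examples:
--         >>> _normalize_section_name("strategies_and_insights")
--         'strategies_and_insights'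
--         >>> _normalize_section_name("STRATEGIES & INSIGHTS\n")
--         'strategies_and_insights'
--         >>> _normalize_section_name("Problem Solving Heuristics")
--         'problem_solving_heuristics'
--     """
--     # Strip leading/trailing whitespace first
--     normalized = section.strip()
--     # Lowercase
--     normalized = normalized.lower()
--     # Replace ampersands with "and"
--     normalized = normalized.replace("&", "and")
--     # Treat hyphens and spaces as equivalent separators -> underscore
--     normalized = normalized.replace("-", "_").replace(" ", "_")
--     # Collapse multiple underscores
--     while "__" in normalized:
--         normalized = normalized.replace("__", "_")
--     return normalized
-- ===== SOURCE B (Python) =====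
-- def _normalize_section_name(section: str) -> str:
--     s = section.strip().lower().replace("&", "and")
--     out = []
--     for c in s:
--         if c == '-' or c == '_' or c == ' ':
--             if not out or out[-1] != '_':
--                 out.append('_')
--         else:
--             out.append(c)
--     return ''.join(out)
-- ===== Notes on version B (the rewrite author's own statement) =====
-- stated objective: alternative
-- what changed: Replaces A's chain of three global string replaces plus the repeated-scan while-loop that collapses doubled underscores with a single left-to-right pass that treats hyphen, space and underscore as separators and emits an underscore only when the previously emitted character was not one.
import Mathlib
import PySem

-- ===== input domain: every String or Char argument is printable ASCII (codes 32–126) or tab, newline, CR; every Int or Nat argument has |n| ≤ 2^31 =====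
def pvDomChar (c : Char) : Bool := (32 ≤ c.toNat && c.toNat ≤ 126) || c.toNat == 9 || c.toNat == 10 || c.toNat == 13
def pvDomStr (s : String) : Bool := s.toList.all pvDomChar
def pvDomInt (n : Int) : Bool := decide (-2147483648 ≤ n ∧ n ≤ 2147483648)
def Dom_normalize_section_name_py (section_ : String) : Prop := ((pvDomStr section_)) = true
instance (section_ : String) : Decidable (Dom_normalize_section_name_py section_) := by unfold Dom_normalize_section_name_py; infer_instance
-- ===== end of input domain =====

-- B replaces A's three global replaces plus the repeated-replace while-loop by a single
-- left-to-right pass that maps '-'/' '/'_' to '_' collapsing runs; same return value, no speed claim.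

-- ===== PORT A =====

-- `halve l = PySem.Chars.replace l "__" "_"` (proved below as `replace_uu`); the port's
-- while-loop cites `collapse_step_lt` for termination, which is stated via `halve`.
def halve : List Char → List Char
  | [] => []
  | [c] => [c]
  | a :: b :: t => if a = '_' ∧ b = '_' then '_' :: halve t else a :: halve (b :: t)

theorem halve_length_le (l : List Char) : (halve l).length ≤ l.length := by
  induction l using halve.induct with
  | case1 => simp [halve]
  | case2 c => simp [halve]
  | case3 a b t h ih => simp [halve, h]; simp at ih ⊢; omega
  | case4 a b t h ih => simp [halve, h]; simpa using ih

theorem halve_length_lt (l : List Char) (h : ['_', '_'] <:+: l) :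
    (halve l).length < l.length := by
  induction l using halve.induct with
  | case1 => simp at h
  | case2 c =>
    rcases h with ⟨p, q, hpq⟩
    have := congrArg List.length hpq; simp at this; omega
  | case3 a b t hu ih =>
    obtain ⟨ha, hb⟩ := hu
    subst ha; subst hb
    rw [halve, if_pos ⟨rfl, rfl⟩]
    have := halve_length_le t
    simp; omega
  | case4 a b t hu ih =>
    have hab : ¬ (a = '_' ∧ b = '_') := hu
    rw [List.infix_cons_iff] at h
    rcases h with hp | h
    · exfalso
      rcases hp with ⟨q, hq⟩
      simp at hq
      exact hab ⟨hq.1.symm, hq.2.1.symm⟩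
    · have := ih h
      rw [halve, if_neg hab]
      simp at this ⊢; omega

-- replace.go with a single-step characterization for old = "__", new = "_"
theorem go_uu (fuel : Nat) : ∀ (l acc : List Char), l.length ≤ fuel →
    PySem.Chars.replace.go ['_', '_'] ['_'] fuel l acc = acc.reverse ++ halve l := by
  induction fuel with
  | zero =>
    intro l acc h
    have : l = [] := by cases l <;> simp_all
    subst this
    simp [PySem.Chars.replace.go, halve]
  | succ n ih =>
    intro l acc h
    match l with
    | [] => simp [PySem.Chars.replace.go, halve]
    | c :: t =>
      rw [PySem.Chars.replace.go]
      by_cases hp : List.isPrefixOf ['_', '_'] (c :: t) = true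
      · rw [if_pos hp]
        match t, hp with
        | [], hp => simp [List.isPrefixOf] at hp
        | d :: t', hp =>
          have hc : c = '_' ∧ d = '_' := by
            simp [List.isPrefixOf] at hp; exact ⟨hp.1.symm, hp.2.symm⟩
          rw [show List.drop ['_', '_'].length (c :: d :: t') = t' from rfl]
          rw [ih t' _ (by simp at h; omega)]
          simp [halve, hc.1, hc.2]
      · rw [if_neg hp]
        rw [ih t _ (by simp at h; omega)]
        match t with
        | [] => simp [halve]
        | d :: t' =>
          have : ¬ (c = '_' ∧ d = '_') := by
            intro ⟨h1, h2⟩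
            subst h1; subst h2
            simp [List.isPrefixOf] at hp
          simp [halve, this]

theorem replace_uu (l : List Char) :
    PySem.Chars.replace l ['_', '_'] ['_'] = halve l := by
  rw [PySem.Chars.replace]
  simp [go_uu l.length l [] (le_refl _)]

theorem collapse_step_lt (s : String) (h : PySem.Str.isIn "__" s = true) :
    (PySem.Str.replace s "__" "_").toList.length < s.toList.length := by
  rw [PySem.Str.isIn_iff_infix] at h
  rw [PySem.Str.toList_replace]
  show (PySem.Chars.replace s.toList "__".toList "_".toList).length < _
  have h2 : "__".toList = ['_', '_'] := rfl
  have h1 : "_".toList = ['_'] := rfl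
  rw [h2, h1, replace_uu]
  exact halve_length_lt _ (by rw [h2] at h; exact h)

-- the `while "__" in normalized:` loop of A
def collapseLoop (s : String) : String :=
  if h : PySem.Str.isIn "__" s = true then collapseLoop (PySem.Str.replace s "__" "_") else s
termination_by s.toList.length
decreasing_by exact collapse_step_lt s h

def normalize_section_name_py (section_ : String) : String :=
  let normalized := PySem.Str.strip section_
  let normalized := PySem.Str.lower normalized
  let normalized := PySem.Str.replace normalized "&" "and"
  let normalized := PySem.Str.replace normalized "-" "_"
  let normalized := PySem.Str.replace normalized " " "_"
  collapseLoop normalized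

-- ===== PORT B =====
def normalize_section_name_py_alt (section_ : String) : String :=
  let s := PySem.Str.replace (PySem.Str.lower (PySem.Str.strip section_)) "&" "and"
  let out := s.toList.foldl
    (fun out c =>
      if c = '-' ∨ c = '_' ∨ c = ' ' then
        if out.getLast? ≠ some '_' then out ++ ['_'] else out
      else out ++ [c]) []
  String.ofList out

-- ===== PRECONDITION & SPEC =====
def Spec_normalize_section_name_py (section_ : String) (out : String) : Prop := out = normalize_section_name_py_alt section_
instance (section_ : String) (out : String) : Decidable (Spec_normalize_section_name_py section_ out) := by unfold Spec_normalize_section_name_py; infer_instance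

-- ===== CLAIM (what is proved, stated in full; the proofs are below) =====
def Claim_equal_normalize_section_name_py : Prop := ∀ (section_ : String), Dom_normalize_section_name_py section_ → Spec_normalize_section_name_py section_ (normalize_section_name_py section_)

-- ===== LEMMAS AND PROOFS =====

-- one-pass collapse of adjacent '_' pairs (the fixed point of A's while-loop)
def cr : List Char → List Char
  | [] => []
  | [c] => [c]
  | a :: b :: t => if a = '_' ∧ b = '_' then cr (b :: t) else a :: cr (b :: t)

-- B's pass, as a recursion carrying "last emitted char was '_'"
def passB : List Char → Bool → List Char
  | [], _ => []
  | c :: t, lastU =>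
    if c = '-' ∨ c = '_' ∨ c = ' ' then
      if lastU then passB t true else '_' :: passB t true
    else c :: passB t false

def sub2 (c : Char) : Char := if c = '-' ∨ c = ' ' then '_' else c

theorem halve_cons (b : Char) (t : List Char) : ∃ u, halve (b :: t) = b :: u := by
  match t with
  | [] => exact ⟨[], rfl⟩
  | d :: t' =>
    by_cases h : b = '_' ∧ d = '_'
    · exact ⟨halve t', by simp [halve, h]⟩
    · exact ⟨halve (d :: t'), by simp [halve, h]⟩

theorem cr_halve (l : List Char) : cr (halve l) = cr l := by
  induction l using halve.induct with
  | case1 => rfl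
  | case2 c => rfl
  | case3 a b t h ih =>
    obtain ⟨ha, hb⟩ := h
    subst ha; subst hb
    rw [halve, if_pos ⟨rfl, rfl⟩, cr, if_pos ⟨rfl, rfl⟩]
    match t, ih with
    | [], _ => rfl
    | c :: t', ih =>
      obtain ⟨u, hu⟩ := halve_cons c t'
      by_cases hc : c = '_'
      · subst hc
        rw [hu] at ih ⊢
        rw [cr, if_pos ⟨rfl, rfl⟩, ih, cr, if_pos ⟨rfl, rfl⟩]
      · have hnc : ¬ ('_' = '_' ∧ c = '_') := by simp [hc]
        rw [hu] at ih ⊢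
        rw [cr, if_neg hnc, ih, cr, if_neg hnc]
  | case4 a b t h ih =>
    rw [halve, if_neg h]
    obtain ⟨u, hu⟩ := halve_cons b t
    rw [hu] at ih ⊢
    rw [cr, if_neg h, cr, if_neg h, ih]

theorem cr_of_no_infix (l : List Char) (h : ¬ ['_', '_'] <:+: l) : cr l = l := by
  induction l using cr.induct with
  | case1 => rfl
  | case2 c => rfl
  | case3 a b t hab ih =>
    exfalso
    exact h ⟨[], t, by simp [hab.1, hab.2]⟩
  | case4 a b t hab ih =>
    rw [cr, if_neg hab, ih]
    intro hi
    exact h (hi.trans (List.IsSuffix.isInfix (List.suffix_cons a (b :: t))))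

theorem loop_eq_cr (s : String) : (collapseLoop s).toList = cr s.toList := by
  rw [collapseLoop]
  by_cases h : PySem.Str.isIn "__" s = true
  · rw [dif_pos h]
    have hlt := collapse_step_lt s h
    have := loop_eq_cr (PySem.Str.replace s "__" "_")
    rw [this, PySem.Str.toList_replace]
    show cr (PySem.Chars.replace s.toList "__".toList "_".toList) = _
    have h2 : "__".toList = ['_', '_'] := rfl
    have h1 : "_".toList = ['_'] := rfl
    rw [h2, h1, replace_uu, cr_halve]
  · rw [dif_neg h]
    rw [Bool.not_eq_true] at h
    rw [PySem.Str.isIn] at h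
    rw [PySem.Chars.isIn_eq_false_iff] at h
    exact (cr_of_no_infix _ (by intro hi; exact h hi)).symm
termination_by s.toList.length
decreasing_by exact collapse_step_lt s h

-- single-char replace = flatMap
theorem go_single (a : Char) (new : List Char) (fuel : Nat) :
    ∀ (l acc : List Char), l.length ≤ fuel →
    PySem.Chars.replace.go [a] new fuel l acc
      = acc.reverse ++ l.flatMap (fun c => if c = a then new else [c]) := by
  induction fuel with
  | zero =>
    intro l acc h
    have : l = [] := by cases l <;> simp_all
    subst this
    simp [PySem.Chars.replace.go]
  | succ n ih =>
    intro l acc h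
    match l with
    | [] => simp [PySem.Chars.replace.go]
    | c :: t =>
      rw [PySem.Chars.replace.go]
      by_cases hc : c = a
      · have hp : List.isPrefixOf [a] (c :: t) = true := by simp [List.isPrefixOf, hc]
        rw [if_pos hp]
        rw [show List.drop [a].length (c :: t) = t from rfl]
        rw [ih t _ (by simp at h; omega)]
        simp [hc]
      · have hp : ¬ List.isPrefixOf [a] (c :: t) = true := by simp [List.isPrefixOf]; exact fun hh => hc hh.symm
        rw [if_neg hp]
        rw [ih t _ (by simp at h; omega)]
        simp [hc]

theorem replace_single (l : List Char) (a : Char) (new : List Char) :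
    PySem.Chars.replace l [a] new = l.flatMap (fun c => if c = a then new else [c]) := by
  rw [PySem.Chars.replace]
  simp [go_single a new l.length l [] (le_refl _)]

theorem replace_single_char (l : List Char) (a b : Char) :
    PySem.Chars.replace l [a] [b] = l.map (fun c => if c = a then b else c) := by
  rw [replace_single]
  induction l with
  | nil => rfl
  | cons c t ih => by_cases hc : c = a <;> simp [hc, ih]

-- A's two separator replaces = one map by sub2
theorem two_replaces_eq_map (l : List Char) :
    PySem.Chars.replace (PySem.Chars.replace l ['-'] ['_']) [' '] ['_'] = l.map sub2 := by
  rw [replace_single_char, replace_single_char, List.map_map]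
  apply List.map_congr_left
  intro c _
  simp only [Function.comp, sub2]
  by_cases h1 : c = '-' <;> by_cases h2 : c = ' ' <;> simp [h1, h2]

theorem cr_underscore_cons (x : List Char) :
    cr ('_' :: x) = '_' :: cr (x.dropWhile (fun c => c = '_')) := by
  induction x with
  | nil => rfl
  | cons c x' ih =>
    by_cases hc : c = '_'
    · subst hc
      rw [cr, if_pos ⟨rfl, rfl⟩, ih]
      simp [List.dropWhile]
    · rw [cr, if_neg (by simp [hc])]
      simp [List.dropWhile, hc]

theorem passB_eq_cr (t : List Char) :
    passB t true = cr ((t.map sub2).dropWhile (fun c => c = '_'))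
    ∧ passB t false = cr (t.map sub2) := by
  induction t with
  | nil => exact ⟨rfl, rfl⟩
  | cons c t ih =>
    by_cases hs : c = '-' ∨ c = '_' ∨ c = ' '
    · have hsub : sub2 c = '_' := by
        rcases hs with h | h | h <;> simp [sub2, h]
      constructor
      · rw [passB, if_pos hs, if_pos rfl, ih.1]
        simp [hsub]
      · rw [passB, if_pos hs]
        simp only [if_neg Bool.false_ne_true, List.map_cons, hsub]
        rw [cr_underscore_cons, ih.1]
    · push_neg at hs
      have hsub : sub2 c = c := by
        simp only [sub2, if_neg (show ¬(c = '-' ∨ c = ' ') from fun h => h.elim hs.1 hs.2.2)]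
      have hcu : ¬ c = '_' := hs.2.1
      have key : cr (c :: t.map sub2) = c :: cr (t.map sub2) := by
        match ht : t.map sub2 with
        | [] => rfl
        | d :: u => rw [cr, if_neg (by simp [hcu])]
      constructor
      · rw [passB, if_neg (by push_neg; exact hs), ih.2]
        simp only [List.map_cons, hsub]
        rw [List.dropWhile_cons_of_neg (by simp [hcu]), key]
      · rw [passB, if_neg (by push_neg; exact hs), ih.2]
        simp only [List.map_cons, hsub, key]

-- B's foldl = pass, with "last emitted char" as the state
theorem foldl_eq_passB (t : List Char) : ∀ (out : List Char),
    t.foldl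
      (fun out c =>
        if c = '-' ∨ c = '_' ∨ c = ' ' then
          if out.getLast? ≠ some '_' then out ++ ['_'] else out
        else out ++ [c]) out
      = out ++ passB t (out.getLast? == some '_') := by
  induction t with
  | nil => intro out; simp [passB]
  | cons c t ih =>
    intro out
    rw [List.foldl_cons]
    by_cases hs : c = '-' ∨ c = '_' ∨ c = ' '
    · rw [if_pos hs]
      by_cases hl : out.getLast? = some '_'
      · rw [if_neg (by simp [hl]), ih]
        rw [passB, if_pos hs, if_pos (by simp [hl])]
        simp [hl]
      · rw [if_pos (by simp [hl]), ih]
        simp only [List.getLast?_append, List.getLast?_singleton]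
        rw [passB, if_pos hs, if_neg (by simp [hl])]
        simp
    · rw [if_neg hs, ih]
      simp only [List.getLast?_append, List.getLast?_singleton]
      rw [passB, if_neg hs]
      have hc : c ≠ '_' := fun h => hs (Or.inr (Or.inl h))
      simp only [Option.some_or]
      rw [show (some c == some '_') = false from by simp [hc]]
      simp

-- ===== VERDICT (by name: the statement is the Claim_ definition above) =====
theorem normalize_section_name_py_spec : Claim_equal_normalize_section_name_py := by
  intro section_ _
  show normalize_section_name_py section_ = normalize_section_name_py_alt section_
  unfold normalize_section_name_py normalize_section_name_py_alt
  set base := PySem.Str.replace (PySem.Str.lower (PySem.Str.strip section_)) "&" "and" with hbase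
  apply String.ext
  rw [loop_eq_cr]
  rw [PySem.Str.toList_replace, PySem.Str.toList_replace]
  show cr (PySem.Chars.replace (PySem.Chars.replace base.toList "-".toList "_".toList) " ".toList "_".toList)
      = (String.ofList _).toList
  rw [show "-".toList = ['-'] from rfl, show " ".toList = [' '] from rfl,
      show "_".toList = ['_'] from rfl]
  rw [two_replaces_eq_map]
  rw [foldl_eq_passB base.toList []]
  simp only [List.nil_append, List.getLast?_nil]
  rw [show ((none : Option Char) == some '_') = false from rfl]
  rw [(passB_eq_cr base.toList).2]
  exact String.toList_ofList.symm
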